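-- pv_equiv track=rewrite | github.com/comewithme1200/Cipher | exponential.py | spawnfinaldig
-- ===== SOURCE A (Python) =====
-- def spawnfinaldig(m):
--     final = []
--     while m>=2:
--         if m%2 == 0:
--             final.append(int(m/2))
--         else:
--             final.append(int((m-1)/2))
--         m = int(m/2)
--     return final
-- ===== SOURCE B (Python) =====
-- def spawnfinaldig(m):
--     if m < 2:
--         return []
--     acc = 0
--     prefixes = []
--     for ch in bin(m)[2:]:
--         acc = acc * 2 + (1 if ch == '1' else 0)
--         prefixes.append(acc)
--     return prefixes[:-1][::-1]
-- ===== Notes on version B (the rewrite author's own statement) =====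
-- stated objective: alternative
-- what changed: replaces the stateful halving while-loop by a forward Horner scan over the binary-digit string bin(m)[2:] that accumulates all bit-prefix values and returns them sliced and reversed
import Mathlib
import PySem

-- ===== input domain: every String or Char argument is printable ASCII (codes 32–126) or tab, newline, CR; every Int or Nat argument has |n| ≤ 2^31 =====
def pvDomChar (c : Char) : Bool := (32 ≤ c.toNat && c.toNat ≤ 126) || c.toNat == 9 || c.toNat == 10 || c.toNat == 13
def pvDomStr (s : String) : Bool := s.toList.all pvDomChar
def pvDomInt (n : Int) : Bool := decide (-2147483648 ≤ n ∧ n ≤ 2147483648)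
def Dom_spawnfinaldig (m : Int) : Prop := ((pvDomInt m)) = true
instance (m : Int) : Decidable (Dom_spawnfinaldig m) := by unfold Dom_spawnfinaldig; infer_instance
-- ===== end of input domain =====

-- B replaces A's stateful halving while-loop by a forward Horner scan over the binary-digit
-- string of m, collecting all bit-prefix values, then slicing and reversing (alternative; same cost).

-- ===== PORT A =====
-- the while loop; int(m/2) is exact float division + truncation: for 2 ≤ m ≤ 2^31 it equals floor division
def spawnfinaldigGo (m : Int) (final : List Int) : List Int :=
  if h : 2 ≤ m then
    spawnfinaldigGo (PySem.Int.floordiv m 2)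
      (final ++ [if PySem.Int.mod m 2 = 0 then PySem.Int.floordiv m 2
                 else PySem.Int.floordiv (m - 1) 2])
  else final
termination_by m.toNat
decreasing_by
  have := PySem.Int.floordiv_eq_ediv_of_pos (a := m) (b := 2) (by omega)
  omega

def spawnfinaldig (m : Int) : List Int := spawnfinaldigGo m []

-- ===== PORT B =====
-- bin(m)[2:], ported by hand step for step: binary digit characters of a nonnegative integer,
-- most significant first (exact for m ≥ 1, the only case B reaches it)
def binChars (n : Nat) : List Char :=
  if h : n < 2 then [Nat.digitChar n]
  else binChars (n / 2) ++ [Nat.digitChar (n % 2)]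
decreasing_by exact Nat.div_lt_self (by omega) (by omega)

-- the for-loop over bin(m)[2:] with state (acc, prefixes); prefixes[:-1] and [::-1] via PySem slice semantics
def spawnfinaldig_alt (m : Int) : List Int :=
  if m < 2 then []
  else
    let r := (binChars m.toNat).foldl
      (fun (st : Int × List Int) ch =>
        let acc := st.1 * 2 + (if ch = '1' then (1 : Int) else 0)
        (acc, st.2 ++ [acc])) ((0 : Int), ([] : List Int))
    (PySem.List.slice r.2 none (some (-1))).reverse

-- ===== PRECONDITION & SPEC =====
def Spec_spawnfinaldig (m : Int) (out : List Int) : Prop := out = spawnfinaldig_alt m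
instance (m : Int) (out : List Int) : Decidable (Spec_spawnfinaldig m out) := by unfold Spec_spawnfinaldig; infer_instance

-- ===== CLAIM (what is proved, stated in full; the proofs are below) =====
def Claim_equal_spawnfinaldig : Prop := ∀ (m : Int), Dom_spawnfinaldig m → Spec_spawnfinaldig m (spawnfinaldig m)

-- ===== LEMMAS AND PROOFS =====

theorem go_stop (m : Int) (final : List Int) (h : ¬ 2 ≤ m) :
    spawnfinaldigGo m final = final := by
  rw [spawnfinaldigGo]; simp [h]

theorem go_step (m : Int) (final : List Int) (h : 2 ≤ m) :
    spawnfinaldigGo m final =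
      spawnfinaldigGo (PySem.Int.floordiv m 2)
        (final ++ [if PySem.Int.mod m 2 = 0 then PySem.Int.floordiv m 2
                   else PySem.Int.floordiv (m - 1) 2]) := by
  rw [spawnfinaldigGo]; simp [h]

theorem go_append (n : Nat) : ∀ m : Int, m.toNat ≤ n → ∀ final : List Int,
    spawnfinaldigGo m final = final ++ spawnfinaldigGo m [] := by
  induction n with
  | zero =>
      intro m h final
      rw [go_stop m final (by omega), go_stop m [] (by omega)]
      simp
  | succ n ih =>
      intro m h final
      by_cases h2 : 2 ≤ m
      · have hd := PySem.Int.floordiv_eq_ediv_of_pos (a := m) (b := 2) (by omega : (0:Int) < 2)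
        have hf : (PySem.Int.floordiv m 2).toNat ≤ n := by omega
        rw [go_step m final h2, go_step m [] h2, ih _ hf, ih _ hf ([] ++ _)]
        simp
      · rw [go_stop m final h2, go_stop m [] h2]
        simp

-- both branches of A's loop body append m // 2
theorem appended_eq (m : Int) (h : 2 ≤ m) :
    (if PySem.Int.mod m 2 = 0 then PySem.Int.floordiv m 2
     else PySem.Int.floordiv (m - 1) 2) = PySem.Int.floordiv m 2 := by
  have hd := PySem.Int.floordiv_eq_ediv_of_pos (a := m) (b := 2) (by omega : (0:Int) < 2)
  have hm := PySem.Int.mod_eq_emod_of_pos (a := m) (b := 2) (by omega : (0:Int) < 2)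
  have hd1 := PySem.Int.floordiv_eq_ediv_of_pos (a := m - 1) (b := 2) (by omega : (0:Int) < 2)
  by_cases hp : PySem.Int.mod m 2 = 0
  · rw [if_pos hp]
  · rw [if_neg hp, hd, hd1]
    rw [hm] at hp
    omega

-- the list of bit-prefix values produced by B's fold, for a starting accumulator a
def prefVals (a : Int) (n : Nat) : List Int :=
  if h : n < 2 then [a * 2 + n]
  else prefVals a (n / 2) ++ [a * 2 ^ (binChars n).length + n]
decreasing_by exact Nat.div_lt_self (by omega) (by omega)

theorem fold_bin (n : Nat) : ∀ (a : Int) (ps : List Int),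
    (binChars n).foldl
      (fun (st : Int × List Int) ch =>
        let acc := st.1 * 2 + (if ch = '1' then (1 : Int) else 0)
        (acc, st.2 ++ [acc])) (a, ps)
      = (a * 2 ^ (binChars n).length + n, ps ++ prefVals a n) := by
  induction n using Nat.strong_induction_on with
  | _ n ih =>
    intro a ps
    by_cases h : n < 2
    · rw [binChars, prefVals]
      simp only [h, dif_pos]
      interval_cases n
      · simp [show Nat.digitChar 0 = '0' from rfl]
      · simp [show Nat.digitChar 1 = '1' from rfl]
    · have hlt : n / 2 < n := Nat.div_lt_self (by omega) (by omega)
      have hbit : (if Nat.digitChar (n % 2) = '1' then (1 : Int) else 0) = ((n % 2 : Nat) : Int) := by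
        rcases Nat.mod_two_eq_zero_or_one n with h0 | h1
        · rw [h0]; decide
        · rw [h1]; decide
      have hn : (n : Int) = ((n / 2 : Nat) : Int) * 2 + ((n % 2 : Nat) : Int) := by
        push_cast; omega
      have hlen : (binChars n).length = (binChars (n / 2)).length + 1 := by
        conv_lhs => rw [binChars]
        simp [h]
      have hXY : (a * 2 ^ (binChars (n / 2)).length + ((n / 2 : Nat) : Int)) * 2 + ((n % 2 : Nat) : Int)
          = a * 2 ^ (binChars n).length + (n : Int) := by
        rw [hlen, pow_succ, hn]; ring
      conv_lhs => rw [binChars]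
      rw [dif_neg h, List.foldl_append, ih _ hlt]
      conv_rhs => rw [prefVals]
      rw [dif_neg h]
      simp only [List.foldl_cons, List.foldl_nil, hbit]
      rw [Prod.mk.injEq]
      refine ⟨?_, ?_⟩
      · rw [hXY]
      · rw [hXY, List.append_assoc]

theorem prefVals_zero_small (n : Nat) (h : n < 2) : prefVals 0 n = [(n : Int)] := by
  rw [prefVals]; simp [h]

theorem prefVals_zero_step (n : Nat) (h : ¬ n < 2) :
    prefVals 0 n = prefVals 0 (n / 2) ++ [(n : Int)] := by
  rw [prefVals]; simp [h]

-- B's value for m ≥ 2 is the reversed prefix list of m/2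
theorem alt_eq (m : Int) (h : 2 ≤ m) :
    spawnfinaldig_alt m = (prefVals 0 (m.toNat / 2)).reverse := by
  have h2 : ¬ m < 2 := by omega
  have hn2 : ¬ m.toNat < 2 := by omega
  rw [spawnfinaldig_alt]
  simp only [h2, if_neg, not_false_iff]
  rw [fold_bin, PySem.List.slice_to_neg_one]
  rw [prefVals_zero_step _ hn2]
  simp

theorem go_eq_pref (N : Nat) : ∀ m : Int, m.toNat ≤ N → 2 ≤ m →
    spawnfinaldigGo m [] = (prefVals 0 (m.toNat / 2)).reverse := by
  induction N with
  | zero => intro m h h2; omega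
  | succ N ih =>
      intro m h h2
      have hd := PySem.Int.floordiv_eq_ediv_of_pos (a := m) (b := 2) (by omega : (0:Int) < 2)
      have hq1 : 1 ≤ PySem.Int.floordiv m 2 := by omega
      have hqt : (PySem.Int.floordiv m 2).toNat = m.toNat / 2 := by omega
      rw [go_step m [] h2, appended_eq m h2,
          go_append (PySem.Int.floordiv m 2).toNat _ (le_refl _)]
      by_cases hs : PySem.Int.floordiv m 2 < 2
      · have hone : PySem.Int.floordiv m 2 = 1 := by omega
        have htn : m.toNat / 2 = 1 := by omega
        rw [go_stop _ [] (by omega), htn, prefVals_zero_small _ (by omega)]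
        rw [hone]; simp
      · have hqN : (PySem.Int.floordiv m 2).toNat ≤ N := by omega
        rw [ih _ hqN (by omega), hqt]
        rw [prefVals_zero_step (m.toNat / 2) (by omega), List.reverse_append]
        have hcast : ((m.toNat / 2 : Nat) : Int) = PySem.Int.floordiv m 2 := by omega
        simp [hcast]

-- ===== VERDICT (by name: the statement is the Claim_ definition above) =====
theorem spawnfinaldig_spec : Claim_equal_spawnfinaldig := by
  intro m _
  show spawnfinaldig m = spawnfinaldig_alt m
  by_cases h2 : 2 ≤ m
  · rw [spawnfinaldig, go_eq_pref m.toNat m (le_refl _) h2, alt_eq m h2]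
  · rw [spawnfinaldig, go_stop m [] h2, spawnfinaldig_alt]
    simp [show m < 2 by omega]
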